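-- pv_equiv track=rewrite | github.com/qvizt/HackerRank-Solutions-Java | Python/Algorithms/Warmup/Compare the Triplets.py | solve
-- ===== SOURCE A (Python) =====
-- def solve(a, b):
--     result = [0, 0]
--
--     for i in range(len(a)):
--         a_val = a[i]
--         b_val = b[i]
--
--         if a_val > b_val:
--             result[0] += 1
--         elif b_val > a_val:
--             result[1] += 1
--         else:
--             continue
--
--     return result
-- ===== SOURCE B (Python) =====
-- def solve(a, b):
--     signs = [(x > y) - (x < y) for x, y in zip(a, b)]
--     return [signs.count(1), signs.count(-1)]
-- ===== Notes on version B (the rewrite author's own statement) =====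
-- stated objective: alternative
-- what changed: Instead of one index-driven loop mutating a two-cell result, B materializes a comparison-sign list (1/0/-1 per zipped pair) and obtains both tallies with list.count on that intermediate structure.
import Mathlib
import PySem

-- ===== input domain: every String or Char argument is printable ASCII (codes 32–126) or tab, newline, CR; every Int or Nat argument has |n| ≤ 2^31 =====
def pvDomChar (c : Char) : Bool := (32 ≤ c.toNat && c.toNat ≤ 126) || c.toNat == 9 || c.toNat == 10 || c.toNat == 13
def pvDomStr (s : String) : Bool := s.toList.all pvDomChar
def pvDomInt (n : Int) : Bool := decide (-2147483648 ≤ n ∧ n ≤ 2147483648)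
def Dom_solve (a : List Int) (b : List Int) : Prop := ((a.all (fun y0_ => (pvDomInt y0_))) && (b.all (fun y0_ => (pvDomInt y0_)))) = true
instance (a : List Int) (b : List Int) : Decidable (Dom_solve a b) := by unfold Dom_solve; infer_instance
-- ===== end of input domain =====

-- B builds an intermediate comparison-sign list and counts 1s and -1s in it, instead of
-- A's single index loop mutating two counters; equivalence of the RETURN value on Pre_.

-- ===== PORT A =====
-- the loop body of A, on the (result0, result1) pair; a_val/b_val via pyGetD (in range on Pre_)
def solveStep (a : List Int) (b : List Int) (r : Int × Int) (i : Int) : Int × Int :=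
  let a_val := PySem.List.pyGetD a i 0
  let b_val := PySem.List.pyGetD b i 0
  if a_val > b_val then (r.1 + 1, r.2)
  else if b_val > a_val then (r.1, r.2 + 1)
  else r

def solve (a : List Int) (b : List Int) : List Int :=
  let r := (PySem.List.pyRange 0 (a.length : Int) 1).foldl (solveStep a b) (0, 0)
  [r.1, r.2]

-- ===== PORT B =====
-- Source B: signs = [(x > y) - (x < y) for x, y in zip(a, b)]; [signs.count(1), signs.count(-1)]
def solve_alt (a : List Int) (b : List Int) : List Int :=
  let signs := (a.zip b).map
    (fun p => (if p.1 > p.2 then (1 : Int) else 0) - (if p.1 < p.2 then (1 : Int) else 0))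
  [(PySem.List.count signs 1 : Int), (PySem.List.count signs (-1) : Int)]

-- ===== PRECONDITION & SPEC =====
-- A indexes b[i] for every i < len(a), so it raises IndexError when b is shorter than a.
def Pre_solve (a : List Int) (b : List Int) : Prop := a.length ≤ b.length
instance (a : List Int) (b : List Int) : Decidable (Pre_solve a b) := by unfold Pre_solve; infer_instance
def pvWitness_solve : List Int × List Int := ([1, 2, 3], [2, 1, 3])

def Spec_solve (a : List Int) (b : List Int) (out : List Int) : Prop := out = solve_alt a b
instance (a : List Int) (b : List Int) (out : List Int) : Decidable (Spec_solve a b out) := by unfold Spec_solve; infer_instance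

-- ===== CLAIM (what is proved, stated in full; the proofs are below) =====
def Claim_equal_solve : Prop := ∀ (a : List Int) (b : List Int), Dom_solve a b → Pre_solve a b → Spec_solve a b (solve a b)

-- ===== LEMMAS AND PROOFS =====

-- B's sign list of a pair of (suffix) lists, and its two counts as Ints
def signsOf (ta tb : List Int) : List Int :=
  (ta.zip tb).map
    (fun p => (if p.1 > p.2 then (1 : Int) else 0) - (if p.1 < p.2 then (1 : Int) else 0))
def tallyGt (ta tb : List Int) : Int := (PySem.List.count (signsOf ta tb) 1 : Int)
def tallyLt (ta tb : List Int) : Int := (PySem.List.count (signsOf ta tb) (-1) : Int)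

-- head decomposition of the two counts
lemma tallyGt_cons (x y : Int) (ta tb : List Int) :
    tallyGt (x :: ta) (y :: tb) = (if x > y then (1 : Int) else 0) + tallyGt ta tb := by
  rcases lt_trichotomy x y with h | h | h
  · have h1 : ¬ x > y := not_lt.mpr h.le
    simp [tallyGt, signsOf, PySem.List.count_eq, List.count_cons, h, h1]
  · simp [tallyGt, signsOf, PySem.List.count_eq, List.count_cons, h]
  · have h1 : ¬ x < y := not_lt.mpr h.le
    simp [tallyGt, signsOf, PySem.List.count_eq, List.count_cons, h, h1]
    push_cast; ring
lemma tallyLt_cons (x y : Int) (ta tb : List Int) :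
    tallyLt (x :: ta) (y :: tb) = (if y > x then (1 : Int) else 0) + tallyLt ta tb := by
  rcases lt_trichotomy x y with h | h | h
  · have h1 : ¬ x > y := not_lt.mpr h.le
    simp [tallyLt, signsOf, PySem.List.count_eq, List.count_cons, h, h1]
    ring
  · simp [tallyLt, signsOf, PySem.List.count_eq, List.count_cons, h]
  · have h1 : ¬ x < y := not_lt.mpr h.le
    simp [tallyLt, signsOf, PySem.List.count_eq, List.count_cons, h, h1]

-- loop invariant: folding A's step over range(s, len a) adds B's tallies of the suffixes
lemma solve_loop_inv (a b : List Int) : ∀ (ta : List Int) (tb : List Int) (s : Nat) (r : Int × Int),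
    ta = a.drop s → tb = b.drop s → ta.length ≤ tb.length →
    (PySem.List.pyRange (s : Int) (a.length : Int) 1).foldl (solveStep a b) r
      = (r.1 + tallyGt ta tb, r.2 + tallyLt ta tb) := by
  intro ta
  induction ta with
  | nil =>
    intro tb s r ha hb _
    have hs : a.length ≤ s := by
      by_contra h
      have := congrArg List.length ha
      simp [List.length_drop] at this ⊢
      omega
    rw [PySem.List.pyRange_one_eq_nil (by exact_mod_cast hs)]
    simp [List.foldl, tallyGt, tallyLt, signsOf, PySem.List.count_eq]
  | cons x ta' ih =>
    intro tb s r ha hb hlen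
    have hs : s < a.length := by
      by_contra h
      rw [List.drop_eq_nil_of_le (by omega)] at ha
      simp at ha
    obtain ⟨y, tb', htb⟩ : ∃ y tb', tb = y :: tb' := by
      cases tb with
      | nil => simp at hlen
      | cons y tb' => exact ⟨y, tb', rfl⟩
    have hsb : s < b.length := by
      have := congrArg List.length hb
      simp [List.length_drop, htb] at this
      omega
    have hax : a[s]? = some x := by
      have h0 : (a.drop s)[0]? = some x := by rw [← ha]; rfl
      simpa using List.getElem?_drop (xs := a) (i := s) (j := 0) ▸ h0
    have hby : b[s]? = some y := by
      have h0 : (b.drop s)[0]? = some y := by rw [← hb, htb]; rfl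
      simpa using List.getElem?_drop (xs := b) (i := s) (j := 0) ▸ h0
    have hga : PySem.List.pyGetD a (s : Int) 0 = x := by
      rw [PySem.List.pyGetD_natCast]; simp [hax]
    have hgb : PySem.List.pyGetD b (s : Int) 0 = y := by
      rw [PySem.List.pyGetD_natCast]; simp [hby]
    rw [PySem.List.pyRange_one_cons (by exact_mod_cast hs)]
    have hstep : ((s : Int) + 1) = ((s + 1 : Nat) : Int) := by push_cast; ring
    have hta' : ta' = a.drop (s + 1) := by
      have := congrArg List.tail ha
      simpa [List.tail_drop] using this
    have htb' : tb' = b.drop (s + 1) := by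
      have := congrArg List.tail hb
      simpa [htb, List.tail_drop] using this
    have hlen' : ta'.length ≤ tb'.length := by
      simp [htb] at hlen; omega
    simp only [List.foldl_cons]
    rw [hstep, ih tb' (s + 1) (solveStep a b r (s : Int)) hta' htb' hlen', htb,
        tallyGt_cons, tallyLt_cons]
    simp only [solveStep, hga, hgb]
    split_ifs <;> simp <;> first | ring | omega

-- ===== VERDICT (by name: the statement is the Claim_ definition above) =====
theorem solve_spec : Claim_equal_solve := by
  intro a b _ hpre
  unfold Spec_solve solve solve_alt
  have := solve_loop_inv a b a b 0 (0, 0) (by simp) (by simp) hpre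
  rw [show ((0 : Nat) : Int) = 0 from rfl] at this
  rw [this]
  simp [tallyGt, tallyLt, signsOf]
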